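-- pv_equiv track=rewrite | github.com/lhy0718/RepoAgents | src/reporepublic/release_announcement.py | normalize_release_announcement_formats
-- ===== SOURCE A (Python) =====
-- VALID_RELEASE_ANNOUNCEMENT_FORMATS = ("json", "markdown")
--
-- def normalize_release_announcement_formats(
--     formats: tuple[str, ...] | list[str] | None,
-- ) -> tuple[str, ...]:
--     if not formats:
--         return ("json",)
--     normalized: list[str] = []
--     for value in formats:
--         lowered = value.strip().lower()
--         if not lowered:
--             continue
--         if lowered == "all":
--             for item in VALID_RELEASE_ANNOUNCEMENT_FORMATS:
--                 if item not in normalized: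
--                     normalized.append(item)
--             continue
--         if lowered not in VALID_RELEASE_ANNOUNCEMENT_FORMATS:
--             raise ValueError(
--                 "Unsupported release announcement format. Expected one of: json, markdown, all"
--             )
--         if lowered not in normalized:
--             normalized.append(lowered)
--     return tuple(normalized or ("json",))
-- ===== SOURCE B (Python) =====
-- VALID_RELEASE_ANNOUNCEMENT_FORMATS = ("json", "markdown")
--
--
-- def normalize_release_announcement_formats(formats):
--     # Flag-based: since the only possible outputs are orderings of {"json","markdown"},
--     # track two seen-flags and which format came first instead of building a deduped list.
--     if not formats:
--         return ("json",)
--     seen_json = seen_markdown = False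
--     json_first = True
--     for value in formats:
--         tok = value.strip().lower()
--         if not tok:
--             continue
--         if tok not in ("all", "json", "markdown"):
--             raise ValueError(
--                 "Unsupported release announcement format. Expected one of: json, markdown, all"
--             )
--         if not (seen_json or seen_markdown):
--             json_first = tok != "markdown"
--         if tok != "markdown":
--             seen_json = True
--         if tok != "json":
--             seen_markdown = True
--     if seen_json and seen_markdown:
--         return ("json", "markdown") if json_first else ("markdown", "json")
--     if seen_markdown:
--         return ("markdown",)
--     return ("json",)
-- ===== Notes on version B (the rewrite author's own statement) =====
-- stated objective: alternative
-- what changed: B maintains no list at all: since the only possible outputs are orderings of {json, markdown}, it tracks two seen-flags plus a which-came-first bit in one pass and constructs the result tuple from that state, instead of A's incremental deduped accumulator list with membership tests and 'all' expansion appends.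
-- outside the precondition, e.g. on normalize_release_announcement_formats(['xml']): A raises ValueError, B raises ValueError
import Mathlib
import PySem

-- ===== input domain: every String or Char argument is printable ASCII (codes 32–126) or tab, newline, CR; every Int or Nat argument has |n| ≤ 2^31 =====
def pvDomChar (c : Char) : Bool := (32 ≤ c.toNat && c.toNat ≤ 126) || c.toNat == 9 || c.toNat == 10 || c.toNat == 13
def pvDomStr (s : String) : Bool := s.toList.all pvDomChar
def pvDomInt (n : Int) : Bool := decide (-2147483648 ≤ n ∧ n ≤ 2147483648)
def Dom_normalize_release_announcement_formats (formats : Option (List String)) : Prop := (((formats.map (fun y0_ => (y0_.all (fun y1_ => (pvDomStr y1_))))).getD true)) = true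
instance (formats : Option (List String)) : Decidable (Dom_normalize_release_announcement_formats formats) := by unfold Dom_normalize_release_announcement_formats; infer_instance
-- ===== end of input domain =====

-- B replaces A's deduped accumulator list by two seen-flags plus a which-came-first bit
-- (simpler state, same return value); A's ValueError on unsupported tokens is excluded by Pre_.

-- ===== PORT A =====
-- A's loop body: dedup incrementally while validating ('raise ValueError' branch returns
-- the accumulator unchanged; those inputs are excluded by Pre_).
def pvAStep (acc : List String) (value : String) : List String :=
  let lowered := PySem.Str.lower (PySem.Str.strip value)
  if lowered = "" then acc
  else if lowered = "all" then
    ["json", "markdown"].foldl (fun a item => if a.contains item then a else a ++ [item]) acc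
  else if ¬ (lowered = "json" ∨ lowered = "markdown") then acc  -- raise ValueError (outside Pre_)
  else if acc.contains lowered then acc else acc ++ [lowered]

def normalize_release_announcement_formats (formats : Option (List String)) : List String :=
  match formats with
  | none => ["json"]
  | some fs =>
    if fs = [] then ["json"]
    else
      let normalized := fs.foldl pvAStep []
      if normalized = [] then ["json"] else normalized

-- ===== PORT B =====
-- B's loop body over state (seen_json, seen_markdown, json_first).
def pvBStep (s : Bool × Bool × Bool) (value : String) : Bool × Bool × Bool :=
  let tok := PySem.Str.lower (PySem.Str.strip value)
  if tok = "" then s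
  else if ¬ (tok = "all" ∨ tok = "json" ∨ tok = "markdown") then s  -- raise ValueError (outside Pre_)
  else
    let jf := if !(s.1 || s.2.1) then decide (tok ≠ "markdown") else s.2.2
    (s.1 || decide (tok ≠ "markdown"), s.2.1 || decide (tok ≠ "json"), jf)

def normalize_release_announcement_formats_alt (formats : Option (List String)) : List String :=
  match formats with
  | none => ["json"]
  | some fs =>
    if fs = [] then ["json"]
    else
      let st := fs.foldl pvBStep (false, false, true)
      if st.1 && st.2.1 then (if st.2.2 then ["json", "markdown"] else ["markdown", "json"])
      else if st.2.1 then ["markdown"]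
      else ["json"]

-- ===== PRECONDITION & SPEC =====
-- Pre_ excludes exactly the inputs on which A raises ValueError: some token whose
-- stripped/lowered form is neither empty nor one of "all", "json", "markdown".
def Pre_normalize_release_announcement_formats (formats : Option (List String)) : Prop :=
  ∀ v ∈ formats.getD [],
      PySem.Str.lower (PySem.Str.strip v) = "" ∨
      PySem.Str.lower (PySem.Str.strip v) = "all" ∨
      PySem.Str.lower (PySem.Str.strip v) = "json" ∨
      PySem.Str.lower (PySem.Str.strip v) = "markdown"
instance (formats : Option (List String)) : Decidable (Pre_normalize_release_announcement_formats formats) := by unfold Pre_normalize_release_announcement_formats; infer_instance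

def pvWitness_normalize_release_announcement_formats : Option (List String) :=
  some [" ALL ", "Json", "", "markdown"]

def Spec_normalize_release_announcement_formats (formats : Option (List String)) (out : List String) : Prop := out = normalize_release_announcement_formats_alt formats
instance (formats : Option (List String)) (out : List String) : Decidable (Spec_normalize_release_announcement_formats formats out) := by unfold Spec_normalize_release_announcement_formats; infer_instance

-- ===== CLAIM (what is proved, stated in full; the proofs are below) =====
def Claim_equal_normalize_release_announcement_formats : Prop := ∀ (formats : Option (List String)), Dom_normalize_release_announcement_formats formats → Pre_normalize_release_announcement_formats formats → Spec_normalize_release_announcement_formats formats (normalize_release_announcement_formats formats)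

-- ===== LEMMAS AND PROOFS =====

-- The list A's accumulator holds, read off B's flag state.
def pvRender (s : Bool × Bool × Bool) : List String :=
  if s.1 && s.2.1 then (if s.2.2 then ["json", "markdown"] else ["markdown", "json"])
  else if s.1 then ["json"]
  else if s.2.1 then ["markdown"]
  else []

-- Reachability invariant of B's state: when only one format was seen, json_first says which.
def pvInv (s : Bool × Bool × Bool) : Prop :=
  (s.1 = true ∧ s.2.1 = false → s.2.2 = true) ∧ (s.2.1 = true ∧ s.1 = false → s.2.2 = false)

theorem pvStep_sim (s : Bool × Bool × Bool) (v : String) (h : pvInv s) :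
    pvAStep (pvRender s) v = pvRender (pvBStep s v) ∧ pvInv (pvBStep s v) := by
  obtain ⟨sj, sm, jf⟩ := s
  by_cases h0 : PySem.Str.lower (PySem.Str.strip v) = ""
  · constructor
    · simp [pvAStep, pvBStep, h0]
    · simpa [pvBStep, h0] using h
  · by_cases h1 : PySem.Str.lower (PySem.Str.strip v) = "all"
    · cases sj <;> cases sm <;> cases jf <;>
        first
        | (exact absurd (h.1 ⟨rfl, rfl⟩) (by decide))
        | (exact absurd (h.2 ⟨rfl, rfl⟩) (by decide))
        | (refine ⟨?_, by simp [pvBStep, pvInv, h1]⟩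
           simp [pvAStep, pvBStep, pvRender, h1])
    · by_cases h2 : PySem.Str.lower (PySem.Str.strip v) = "json"
      · cases sj <;> cases sm <;> cases jf <;>
          first
          | (exact absurd (h.1 ⟨rfl, rfl⟩) (by decide))
          | (exact absurd (h.2 ⟨rfl, rfl⟩) (by decide))
          | (refine ⟨?_, by simp [pvBStep, pvInv, h2]⟩
             simp [pvAStep, pvBStep, pvRender, h1, h2])
      · by_cases h3 : PySem.Str.lower (PySem.Str.strip v) = "markdown"
        · cases sj <;> cases sm <;> cases jf <;>
            first
            | (exact absurd (h.1 ⟨rfl, rfl⟩) (by decide))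
            | (exact absurd (h.2 ⟨rfl, rfl⟩) (by decide))
            | (refine ⟨?_, by simp [pvBStep, pvInv, h3]⟩
               simp [pvAStep, pvBStep, pvRender, h3])
        · constructor
          · simp [pvAStep, pvBStep, h0, h1, h2, h3]
          · simpa [pvBStep, h0, h1, h2, h3] using h

theorem pvFold_sim (fs : List String) (s : Bool × Bool × Bool) (h : pvInv s) :
    fs.foldl pvAStep (pvRender s) = pvRender (fs.foldl pvBStep s) ∧
      pvInv (fs.foldl pvBStep s) := by
  induction fs generalizing s with
  | nil => exact ⟨rfl, h⟩
  | cons v t ih =>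
    obtain ⟨he, hi⟩ := pvStep_sim s v h
    simpa [List.foldl_cons, he] using ih (pvBStep s v) hi

theorem pvFinal (st : Bool × Bool × Bool) :
    (if pvRender st = [] then ["json"] else pvRender st)
      = (if st.1 && st.2.1 then (if st.2.2 then ["json", "markdown"] else ["markdown", "json"])
         else if st.2.1 then ["markdown"]
         else ["json"]) := by
  obtain ⟨sj, sm, jf⟩ := st
  cases sj <;> cases sm <;> cases jf <;> decide

-- ===== VERDICT (by name: the statement is the Claim_ definition above) =====
theorem normalize_release_announcement_formats_spec : Claim_equal_normalize_release_announcement_formats := by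
  intro formats _ _
  unfold Spec_normalize_release_announcement_formats
  unfold normalize_release_announcement_formats normalize_release_announcement_formats_alt
  cases formats with
  | none => rfl
  | some fs =>
    by_cases hfs : fs = []
    · simp [hfs]
    · simp only [hfs, if_false]
      have h := pvFold_sim fs (false, false, true) (by exact ⟨by simp, by simp⟩)
      have hr : (pvRender (false, false, true)) = ([] : List String) := rfl
      rw [hr] at h
      rw [h.1, pvFinal]
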